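-- pv_equiv track=rewrite | github.com/Lebowsky/simple_keep | ui_models.py | _add_text_in_values
-- ===== SOURCE A (Python) =====
-- def _add_text_in_values(values: dict) -> dict:
--     for key in values.keys():
--         if key == 'best_before' and values[key]:
--             values[key] = f'годен до: {values[key]}'
--         elif key == 'production_date' and values[key]:
--             values[key] = f'дата произв.: {values[key]}'
--         elif key == 'qtty' and values[key] is not None and values[key] != '':
--             values[key] = f'кол-во: {values[key]}'
--     return values
-- ===== SOURCE B (Python) =====
-- def _add_text_in_values(values: dict) -> dict:
--     best = values.get('best_before')
--     if best:
--         values['best_before'] = f'годен до: {best}'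
--     prod = values.get('production_date')
--     if prod:
--         values['production_date'] = f'дата произв.: {prod}'
--     if 'qtty' in values and values['qtty'] is not None and values['qtty'] != '':
--         values['qtty'] = f'кол-во: {values["qtty"]}'
--     return values
-- ===== Notes on version B (the rewrite author's own statement) =====
-- stated objective: simpler
-- what changed: B drops the loop over all dict keys and instead performs three independent guarded in-place updates, each looking up its known key directly; Pre_ excludes association lists with duplicate keys, which represent no Python dict, so first-match-vs-every-occurrence updating there is accidental.
import Mathlib
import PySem

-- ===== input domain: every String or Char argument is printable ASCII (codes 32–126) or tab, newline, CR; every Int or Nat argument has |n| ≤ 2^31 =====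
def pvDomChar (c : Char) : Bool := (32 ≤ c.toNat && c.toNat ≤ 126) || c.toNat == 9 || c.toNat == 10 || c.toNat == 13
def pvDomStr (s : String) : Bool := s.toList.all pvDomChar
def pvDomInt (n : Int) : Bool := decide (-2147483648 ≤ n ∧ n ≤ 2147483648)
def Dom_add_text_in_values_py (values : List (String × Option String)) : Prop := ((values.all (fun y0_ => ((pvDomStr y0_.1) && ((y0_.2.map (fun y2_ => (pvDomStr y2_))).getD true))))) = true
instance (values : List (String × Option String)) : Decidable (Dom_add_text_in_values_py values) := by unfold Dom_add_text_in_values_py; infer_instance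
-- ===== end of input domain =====

-- B replaces A's loop over every dict key by three direct guarded updates of the known keys
-- ('best_before', 'production_date', 'qtty'); same in-place mutation of the argument dict, simpler decomposition.


-- ===== PORT A =====
-- truthiness of a Python dict value of type Optional[str]: None and '' are falsy
def pvTruthy (v : Option String) : Bool :=
  match v with
  | none => false
  | some s => s ≠ ""

-- A: 'for key in values.keys(): <if-chain reassigning values[key]>' — entry-by-entry map over the dict
def add_text_in_values_py (values : List (String × Option String)) : List (String × Option String) :=
  values.map (fun p =>
    if p.1 == "best_before" && pvTruthy p.2 then
      (p.1, p.2.map (fun s => "годен до: " ++ s))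
    else if p.1 == "production_date" && pvTruthy p.2 then
      (p.1, p.2.map (fun s => "дата произв.: " ++ s))
    else if p.1 == "qtty" && p.2 != none && p.2 != some "" then
      (p.1, p.2.map (fun s => "кол-во: " ++ s))
    else p)

-- ===== PORT B =====
-- values.get(key): first matching entry's value (none = key absent)
def pvGetB (values : List (String × Option String)) (key : String) : Option (Option String) :=
  (values.find? (fun p => p.1 == key)).map (·.2)

-- values[key] = nv: overwrite the (first) entry with this key, in place
def pvSetB (values : List (String × Option String)) (key : String) (nv : Option String) :
    List (String × Option String) :=
  match values with
  | [] => []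
  | (k, v) :: rest => if k == key then (k, nv) :: rest else (k, v) :: pvSetB rest key nv

-- one guarded update: "if values.get(key): values[key] = pre + values[key]"
def pvUpdB (key pre : String) (values : List (String × Option String)) :
    List (String × Option String) :=
  match pvGetB values key with
  | some (some s) => if s ≠ "" then pvSetB values key (some (pre ++ s)) else values
  | _ => values

def add_text_in_values_py_alt (values : List (String × Option String)) : List (String × Option String) :=
  pvUpdB "qtty" "кол-во: "
    (pvUpdB "production_date" "дата произв.: "
      (pvUpdB "best_before" "годен до: " values))

-- ===== PRECONDITION & SPEC =====
-- Pre_ excludes association lists with duplicate keys: they represent no Python dict (A raises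
-- AttributeError on any non-dict), so first-match-vs-every-occurrence updating there is accidental.
def Pre_add_text_in_values_py (values : List (String × Option String)) : Prop :=
  (values.map Prod.fst).Nodup
instance (values : List (String × Option String)) : Decidable (Pre_add_text_in_values_py values) := by
  unfold Pre_add_text_in_values_py; infer_instance

def pvWitness_add_text_in_values_py : (List (String × Option String)) :=
  [("best_before", some "2020-01-01"), ("qtty", some "3"), ("name", none)]

def Spec_add_text_in_values_py (values : List (String × Option String)) (out : List (String × Option String)) : Prop := out = add_text_in_values_py_alt values
instance (values : List (String × Option String)) (out : List (String × Option String)) : Decidable (Spec_add_text_in_values_py values out) := by unfold Spec_add_text_in_values_py; infer_instance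

-- ===== CLAIM (what is proved, stated in full; the proofs are below) =====
def Claim_equal_add_text_in_values_py : Prop := ∀ (values : List (String × Option String)), Dom_add_text_in_values_py values → Pre_add_text_in_values_py values → Spec_add_text_in_values_py values (add_text_in_values_py values)

-- ===== LEMMAS AND PROOFS =====

-- the per-key map that one guarded update of B performs on a duplicate-free dict
def pvStep (key pre : String) (p : String × Option String) : String × Option String :=
  if p.1 == key && pvTruthy p.2 then (p.1, p.2.map (fun s => pre ++ s)) else p

theorem pvMap_step_id (key pre : String) (vs : List (String × Option String))
    (h : ∀ p ∈ vs, p.1 ≠ key) : vs.map (pvStep key pre) = vs := by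
  induction vs with
  | nil => rfl
  | cons p rest ih =>
    have hp : (p.1 == key) = false := by simpa using h p (List.mem_cons_self)
    simp [pvStep, hp, ih (fun q hq => h q (List.mem_cons_of_mem _ hq))]

theorem pvUpdB_cons_ne (key pre : String) (p : String × Option String)
    (rest : List (String × Option String)) (h : p.1 ≠ key) :
    pvUpdB key pre (p :: rest) = p :: pvUpdB key pre rest := by
  obtain ⟨k, v⟩ := p
  have hkk : (k == key) = false := by simpa using h
  unfold pvUpdB pvGetB
  simp only [List.find?_cons, hkk]
  cases hf : (rest.find? fun p => p.1 == key) with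
  | none => simp
  | some q =>
    cases hv : q.2 with
    | none => simp [hv]
    | some s =>
      by_cases hs : s = ""
      · simp [hv, hs]
      · simp [hv, hs, pvSetB, hkk]

theorem pvUpdB_eq_map (key pre : String) (vs : List (String × Option String))
    (h : (vs.map Prod.fst).Nodup) :
    pvUpdB key pre vs = vs.map (pvStep key pre) := by
  induction vs with
  | nil => rfl
  | cons p rest ih =>
    simp only [List.map_cons, List.nodup_cons] at h
    obtain ⟨hnm, hnd⟩ := h
    by_cases hk : p.1 = key
    · have hrest : ∀ q ∈ rest, q.1 ≠ key := by
        intro q hq hqk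
        apply hnm
        rw [hk, ← hqk]
        exact List.mem_map_of_mem hq
      obtain ⟨k, v⟩ := p
      simp only [] at hk
      subst hk
      have hmapid := pvMap_step_id k pre rest hrest
      unfold pvUpdB pvGetB
      cases v with
      | none => simp [pvStep, pvTruthy, hmapid]
      | some s =>
        by_cases hs : s = ""
        · subst hs; simp [pvStep, pvTruthy, hmapid]
        · simp [pvStep, pvTruthy, hs, pvSetB, hmapid]
    · rw [pvUpdB_cons_ne _ _ _ _ hk, ih hnd]
      simp [pvStep, hk]

theorem pvStep_fst (key pre : String) (p : String × Option String) :
    (pvStep key pre p).1 = p.1 := by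
  unfold pvStep; split <;> rfl

theorem pvMap_fst_step (key pre : String) (vs : List (String × Option String)) :
    (vs.map (pvStep key pre)).map Prod.fst = vs.map Prod.fst := by
  simp [List.map_map, Function.comp_def, pvStep_fst]

-- ===== VERDICT (by name: the statement is the Claim_ definition above) =====
theorem add_text_in_values_py_spec : Claim_equal_add_text_in_values_py := by
  intro values _ hpre
  unfold Spec_add_text_in_values_py add_text_in_values_py_alt
  have h1 := pvUpdB_eq_map "best_before" "годен до: " values hpre
  rw [h1]
  have hpre2 : ((values.map (pvStep "best_before" "годен до: ")).map Prod.fst).Nodup := by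
    rw [pvMap_fst_step]; exact hpre
  rw [pvUpdB_eq_map "production_date" "дата произв.: " _ hpre2]
  have hpre3 : (((values.map (pvStep "best_before" "годен до: ")).map
      (pvStep "production_date" "дата произв.: ")).map Prod.fst).Nodup := by
    rw [pvMap_fst_step, pvMap_fst_step]; exact hpre
  rw [pvUpdB_eq_map "qtty" "кол-во: " _ hpre3]
  unfold add_text_in_values_py
  simp only [List.map_map]
  apply List.map_congr_left
  intro p _
  obtain ⟨k, v⟩ := p
  simp only [Function.comp_apply, pvStep]
  by_cases h1 : k = "best_before"
  · subst h1
    cases v with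
    | none => simp [pvTruthy]
    | some s =>
      by_cases hs : s = "" <;> simp [pvTruthy, hs]
  · by_cases h2 : k = "production_date"
    · subst h2
      cases v with
      | none => simp [pvTruthy]
      | some s =>
        by_cases hs : s = "" <;> simp [pvTruthy, hs]
    · by_cases h3 : k = "qtty"
      · subst h3
        cases v with
        | none => simp [pvTruthy]
        | some s =>
          by_cases hs : s = "" <;> simp [pvTruthy, hs]
      · simp [pvTruthy, h1, h2, h3]
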